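-- pv_equiv track=rewrite | github.com/saharadoesdev/codepath-tip102-solutions | Week 03/TIP102_w3s2.py | process_performance_requests
-- ===== SOURCE A (Python) =====
-- def process_performance_requests(requests):
--     order = []
--
--     d = {}
--     for r in requests:
--         d[r[0]] = r[1]
--
--
--     for i in range(len(d)):
--         temp = max(d.keys())
--         order.append(d[temp])
--         d.pop(temp)
--
--     return order
-- ===== SOURCE B (Python) =====
-- def process_performance_requests(requests):
--     d = {}
--     for key, value in requests:
--         d[key] = value
--     return [v for _, v in sorted(d.items(), key=lambda item: item[0], reverse=True)]
-- ===== Notes on version B (the rewrite author's own statement) =====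
-- stated objective: alternative
-- what changed: Replaces the repeated max-extraction loop over the dict (a selection sort, quadratic in the number of distinct keys) with one sort of the deduplicated items by key descending, then a projection to the values.
import Mathlib
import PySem

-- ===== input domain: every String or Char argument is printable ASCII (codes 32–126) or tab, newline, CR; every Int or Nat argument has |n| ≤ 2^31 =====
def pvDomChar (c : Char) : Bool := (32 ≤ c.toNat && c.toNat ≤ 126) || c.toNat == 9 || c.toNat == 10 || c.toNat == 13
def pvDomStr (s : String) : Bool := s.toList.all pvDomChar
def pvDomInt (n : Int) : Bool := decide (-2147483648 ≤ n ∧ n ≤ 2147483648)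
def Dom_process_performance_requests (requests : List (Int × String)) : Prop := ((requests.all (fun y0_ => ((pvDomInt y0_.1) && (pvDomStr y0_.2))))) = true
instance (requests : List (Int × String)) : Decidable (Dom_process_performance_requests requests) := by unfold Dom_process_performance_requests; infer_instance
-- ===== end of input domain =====

-- B replaces A's repeated max-extraction loop over the dict (a selection sort) by a single
-- sort of the deduplicated items by key descending; same return value everywhere.

-- ===== PORT A =====
-- the 'for i in range(len(d))' loop: each iteration extracts the max key, appends its value, pops it.
-- 'd[temp]' is ported as getD with default "": temp = max(d.keys()) is always a present key, so
-- the default is never used and Python's KeyError is unreachable.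
def pvLoopA : Nat → PySem.Dict Int String → List String → List String
  | 0, _, order => order
  | Nat.succ n, d, order =>
    match PySem.List.max? d.keys (fun k => k) with
    | none => order      -- unreachable: the loop runs d.size times, so d.keys is nonempty here
    | some temp => pvLoopA n (d.erase temp) (order ++ [d.getD temp ""])

def process_performance_requests (requests : List (Int × String)) : List String :=
  let d := requests.foldl (fun d r => d.insert r.1 r.2) PySem.Dict.empty
  pvLoopA d.size d []

-- ===== PORT B =====
def process_performance_requests_alt (requests : List (Int × String)) : List String :=
  let d := requests.foldl (fun d r => d.insert r.1 r.2) PySem.Dict.empty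
  (PySem.List.sorted d.items (fun item => item.1) true).map (fun item => item.2)

-- ===== PRECONDITION & SPEC =====
def Spec_process_performance_requests (requests : List (Int × String)) (out : List String) : Prop := out = process_performance_requests_alt requests
instance (requests : List (Int × String)) (out : List String) : Decidable (Spec_process_performance_requests requests out) := by unfold Spec_process_performance_requests; infer_instance

-- ===== CLAIM (what is proved, stated in full; the proofs are below) =====
def Claim_equal_process_performance_requests : Prop := ∀ (requests : List (Int × String)), Dom_process_performance_requests requests → Spec_process_performance_requests requests (process_performance_requests requests)

-- ===== LEMMAS AND PROOFS =====

-- a dict with Nodup keys splits around any of its items, with the key absent on both sides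
theorem pv_items_split (d : PySem.Dict Int String) (m : Int) (v : String)
    (hmem : (m, v) ∈ d.items) (hnd : d.keys.Nodup) :
    ∃ pre suf, d.items = pre ++ (m, v) :: suf ∧
      (∀ p ∈ pre, p.1 ≠ m) ∧ (∀ p ∈ suf, p.1 ≠ m) := by
  obtain ⟨pre, suf, hsplit⟩ := List.append_of_mem hmem
  have hkeys : d.keys = pre.map Prod.fst ++ m :: suf.map Prod.fst := by
    simp [PySem.Dict.keys, hsplit]
  rw [hkeys] at hnd
  have hA := List.nodup_append.mp hnd
  refine ⟨pre, suf, hsplit, ?_, ?_⟩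
  · intro p hp hpm
    have hmm : m ∈ pre.map Prod.fst := by
      have := List.mem_map_of_mem (f := Prod.fst) hp
      rwa [hpm] at this
    exact hA.2.2 m hmm m (by simp) rfl
  · intro p hp hpm
    have hmm : m ∈ suf.map Prod.fst := by
      have := List.mem_map_of_mem (f := Prod.fst) hp
      rwa [hpm] at this
    exact (List.nodup_cons.mp hA.2.1).1 hmm

-- erase of the unique item with key m leaves exactly the other items
theorem pv_erase_items (d : PySem.Dict Int String) (m : Int) (v : String)
    (pre suf : List (Int × String)) (hsplit : d.items = pre ++ (m, v) :: suf)
    (hpre : ∀ p ∈ pre, p.1 ≠ m) (hsuf : ∀ p ∈ suf, p.1 ≠ m) :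
    (d.erase m).items = pre ++ suf := by
  show (d.items.filter (fun p => !p.1 == m)) = pre ++ suf
  rw [hsplit, List.filter_append, List.filter_cons]
  have h1 : pre.filter (fun p => !p.1 == m) = pre :=
    List.filter_eq_self.mpr (fun p hp => by simpa using hpre p hp)
  have h2 : suf.filter (fun p => !p.1 == m) = suf :=
    List.filter_eq_self.mpr (fun p hp => by simpa using hsuf p hp)
  simp [h1, h2]

-- the descending sort of a dict's items starts with the maximal key's item
theorem pv_sorted_cons_max (d : PySem.Dict Int String) (m : Int) (v : String)
    (hmem : (m, v) ∈ d.items) (hnd : d.keys.Nodup)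
    (hmax : ∀ k ∈ d.keys, k ≤ m) :
    PySem.List.sorted d.items (fun item => item.1) true =
      (m, v) :: PySem.List.sorted (d.erase m).items (fun item => item.1) true := by
  obtain ⟨pre, suf, hsplit, hpre, hsuf⟩ := pv_items_split d m v hmem hnd
  have herase := pv_erase_items d m v pre suf hsplit hpre hsuf
  apply PySem.List.sorted_rev_eq_of_perm_of_pairwise_gt
  · -- permutation
    refine List.Perm.trans (List.Perm.cons _ (PySem.List.sorted_perm _ _ _)) ?_
    rw [herase, hsplit]
    exact List.perm_middle.symm
  · -- pairwise strictly decreasing keys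
    have hmemE : ∀ p ∈ PySem.List.sorted (d.erase m).items (fun item => item.1) true,
        p.1 < m := by
      intro p hp
      have hpE : p ∈ (d.erase m).items := (PySem.List.mem_sorted _ _ _ _).mp hp
      have hpD : p ∈ d.items := by
        rw [herase] at hpE; rw [hsplit]
        rcases List.mem_append.mp hpE with h | h
        · exact List.mem_append.mpr (Or.inl h)
        · exact List.mem_append.mpr (Or.inr (List.mem_cons_of_mem _ h))
      have hne : p.1 ≠ m := by
        rw [herase] at hpE
        rcases List.mem_append.mp hpE with h | h
        · exact hpre p h
        · exact hsuf p h
      have hle : p.1 ≤ m := hmax p.1 (by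
        simpa [PySem.Dict.keys] using List.mem_map_of_mem (f := Prod.fst) hpD)
      omega
    refine List.pairwise_cons.mpr ⟨hmemE, ?_⟩
    -- within the sorted erase-items: ≤ from sortedness, ≠ from Nodup keys, hence <
    have hpw : (PySem.List.sorted (d.erase m).items (fun item => item.1) true).Pairwise
        (fun a b => (b.1 : Int) ≤ a.1) := PySem.List.sorted_pairwise_rev _ _
    have hndE : ((PySem.List.sorted (d.erase m).items (fun item => item.1) true).map
        Prod.fst).Nodup := by
      have hsub : ((d.erase m).items.map Prod.fst).Sublist (d.items.map Prod.fst) :=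
        List.Sublist.map Prod.fst List.filter_sublist
      have hndI : ((d.erase m).items.map Prod.fst).Nodup :=
        hsub.nodup (by simpa [PySem.Dict.keys] using hnd)
      exact (((PySem.List.sorted_perm _ _ _).map Prod.fst).nodup_iff).mpr hndI
    have hne : (PySem.List.sorted (d.erase m).items (fun item => item.1) true).Pairwise
        (fun a b => a.1 ≠ b.1) := List.pairwise_map.mp hndE
    exact (hpw.and hne).imp (fun {a b} h => lt_of_le_of_ne h.1 (Ne.symm h.2))

-- A's extraction loop equals the descending sort, for any dict with Nodup keys
theorem pv_loopA_eq_sorted (n : Nat) (d : PySem.Dict Int String) (acc : List String)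
    (hn : d.size = n) (hnd : d.keys.Nodup) :
    pvLoopA n d acc =
      acc ++ (PySem.List.sorted d.items (fun item => item.1) true).map (fun item => item.2) := by
  induction n generalizing d acc with
  | zero =>
    have : d.items = [] := List.length_eq_zero_iff.mp hn
    simp [pvLoopA, this, PySem.List.sorted]
  | succ n ih =>
    have hne : d.keys ≠ [] := by
      have hl : d.keys.length = Nat.succ n := by
        simpa [PySem.Dict.keys, PySem.Dict.size] using hn
      intro h
      rw [h] at hl
      simp at hl
    obtain ⟨m, hm⟩ : ∃ m, PySem.List.max? d.keys (fun k => k) = some m := by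
      cases hmx : PySem.List.max? d.keys (fun k => k) with
      | none => exact absurd ((PySem.List.max?_eq_none_iff d.keys (fun k => k)).mp hmx) hne
      | some m => exact ⟨m, rfl⟩
    have hmk : m ∈ d.keys := PySem.List.max?_mem hm
    have hmax : ∀ k ∈ d.keys, k ≤ m := PySem.List.max?_isMax hm
    obtain ⟨p, hpmem, hpfst⟩ := List.mem_map.mp hmk
    obtain ⟨mv⟩ : ∃ v, (m, p.2) = (m, v) := ⟨p.2, rfl⟩
    have hmemItem : (m, p.2) ∈ d.items := by
      have : p = (m, p.2) := by rw [← hpfst]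
      rwa [← this]
    have hget : d.getD m "" = p.2 := PySem.Dict.getD_of_mem_items d hmemItem hnd ""
    have hsortcons := pv_sorted_cons_max d m p.2 hmemItem hnd hmax
    obtain ⟨pre, suf, hsplit, hpre, hsuf⟩ := pv_items_split d m p.2 hmemItem hnd
    have herase := pv_erase_items d m p.2 pre suf hsplit hpre hsuf
    have hsizeE : (d.erase m).size = n := by
      have h1 : (d.erase m).items.length = pre.length + suf.length := by
        rw [herase]; simp
      have h2 : d.items.length = pre.length + suf.length + 1 := by
        rw [hsplit]; simp; omega
      simp only [PySem.Dict.size] at hn ⊢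
      omega
    have hndE : (d.erase m).keys.Nodup := by
      have hsub : ((d.erase m).items.map Prod.fst).Sublist (d.items.map Prod.fst) :=
        List.Sublist.map Prod.fst List.filter_sublist
      exact hsub.nodup (by simpa [PySem.Dict.keys] using hnd)
    simp only [pvLoopA, hm, hget]
    rw [ih (d.erase m) (acc ++ [p.2]) hsizeE hndE, hsortcons]
    simp

-- ===== VERDICT (by name: the statement is the Claim_ definition above) =====
theorem process_performance_requests_spec : Claim_equal_process_performance_requests := by
  intro requests _
  unfold Spec_process_performance_requests process_performance_requests process_performance_requests_alt
  apply pv_loopA_eq_sorted _ _ _ rfl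
  exact PySem.Dict.nodup_keys_foldl_insert_key requests (fun r => r.1) (fun _ r => r.2)
    PySem.Dict.empty PySem.Dict.nodup_keys_empty
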